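-- pv_equiv track=rewrite | github.com/openstates/people | src/ospeople/cli/merge.py | merge_contact_details
-- ===== SOURCE A (Python) =====
-- from collections import defaultdict
--
-- def merge_contact_details(old, new):
--     # figure out which office entries are which
--     old_offices = defaultdict(dict)
--     new_offices = defaultdict(dict)
--     offices = []
--     update = False
--
--     for office in old or []:
--         note = office["note"]
--         if not old_offices[note]:
--             old_offices[note] = office
--         else:
--             raise NotImplementedError(f"extra old {note}")
--     for office in new or []:
--         note = office["note"]
--         if not new_offices[note]:
--             new_offices[note] = office
--         else:
--             raise NotImplementedError(f"extra old {note}")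
--
--     for note in sorted(set(old_offices) | set(new_offices)):
--         combined = update_office(old_offices[note], new_offices[note])
--         offices.append(combined)
--         if combined != old_offices[note]:
--             update = True
--
--     # return all offices if there were any changes
--     if update:
--         return offices
--     else:
--         return None
--
-- def update_office(old_office, new_office):
--     """ function returns a copy of old_office updated with values from new if applicable """
--     updated_office = old_office.copy()
--     # update each field in office
--     for newfield, newval in new_office.items():
--         for oldfield, oldval in old_office.items():
--             if oldfield == newfield and newval != oldval:
--                 updated_office[oldfield] = newval
--                 break
--         else:
--             # add new fields to updated office
--             updated_office[newfield] = newval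
--     return updated_office
-- ===== SOURCE B (Python) =====
-- def _sorted_unique(offices):
--     result = sorted(offices, key=lambda o: o["note"])
--     # adjacent equal notes = a repeated note on this side
--     for a, b in zip(result, result[1:]):
--         if a["note"] == b["note"]:
--             raise NotImplementedError(f"extra old {a['note']}")
--     return result
--
--
-- def merge_contact_details(old, new):
--     olds = _sorted_unique(old or [])
--     news = _sorted_unique(new or [])
--     offices = []
--     changed = False
--     i = j = 0
--     # two-pointer merge of the two note-sorted lists
--     while i < len(olds) or j < len(news):
--         if j >= len(news) or (i < len(olds) and olds[i]["note"] < news[j]["note"]):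
--             offices.append(dict(olds[i]))
--             i += 1
--         elif i >= len(olds) or news[j]["note"] < olds[i]["note"]:
--             offices.append(dict(news[j]))
--             changed = True
--             j += 1
--         else:
--             combined = {**olds[i], **news[j]}
--             if combined != olds[i]:
--                 changed = True
--             offices.append(combined)
--             i += 1
--             j += 1
--     return offices if changed else None
-- ===== Notes on version B (the rewrite author's own statement) =====
-- stated objective: alternative
-- what changed: B replaces A's note-keyed defaultdict indexes and the loop over the sorted union of keys by sorting each side once and doing a two-pointer merge of the two note-sorted lists, and replaces update_office's nested for/else field scan by a single dict merge {**old, **new}.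
import Mathlib
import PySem

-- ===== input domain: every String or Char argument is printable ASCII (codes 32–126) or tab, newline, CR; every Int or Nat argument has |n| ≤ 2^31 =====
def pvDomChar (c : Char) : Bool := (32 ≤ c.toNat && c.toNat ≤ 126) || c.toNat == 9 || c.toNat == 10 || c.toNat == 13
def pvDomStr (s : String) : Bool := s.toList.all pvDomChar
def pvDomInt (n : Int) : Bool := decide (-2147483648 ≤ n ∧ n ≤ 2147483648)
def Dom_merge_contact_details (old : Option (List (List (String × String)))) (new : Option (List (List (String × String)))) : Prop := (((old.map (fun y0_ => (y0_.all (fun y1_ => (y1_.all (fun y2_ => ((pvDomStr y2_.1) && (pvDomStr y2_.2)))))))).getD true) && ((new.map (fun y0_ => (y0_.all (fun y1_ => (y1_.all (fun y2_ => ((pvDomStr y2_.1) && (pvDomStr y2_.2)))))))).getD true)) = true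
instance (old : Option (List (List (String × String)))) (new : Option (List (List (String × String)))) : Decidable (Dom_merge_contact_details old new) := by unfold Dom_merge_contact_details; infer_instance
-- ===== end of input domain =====

-- B replaces A's note-keyed defaultdict indexes and the loop over the sorted union of their
-- keys by sorting each side once and two-pointer-merging the two note-sorted lists, and
-- replaces update_office's nested for/else field scan by one dict merge (objective: alternative).

-- ===== PORT A =====
-- Python dict equality (`combined != old_offices[note]`) ignores insertion order; both
-- Pythons compare dicts with !=, modelled exactly by this helper.
def pvDictEq (d e : PySem.Dict String String) : Bool :=
  d.size == e.size && d.items.all (fun kv => e.get? kv.1 == some kv.2)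

-- update_office's inner `for oldfield, oldval in old_office.items(): … break / else: …`
def pvUpdateField (upd : PySem.Dict String String) (olds : List (String × String))
    (nf nv : String) : PySem.Dict String String :=
  match olds with
  | [] => upd.insert nf nv
  | (of, ov) :: rest =>
      if of == nf && !(nv == ov) then upd.insert of nv
      else pvUpdateField upd rest nf nv

def pvUpdateOffice (oldOffice newOffice : PySem.Dict String String) : PySem.Dict String String :=
  newOffice.items.foldl (fun upd kv => pvUpdateField upd oldOffice.items kv.1 kv.2) oldOffice

-- the first two loops of A: `old_offices[note]` is a defaultdict lookup (empty dict default);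
-- on the NotImplementedError branch (duplicate note, excluded by Pre_) the port keeps the dict.
def pvStepA (d : PySem.Dict String (PySem.Dict String String)) (office : List (String × String)) :
    PySem.Dict String (PySem.Dict String String) :=
  let o := PySem.Dict.ofList office
  let note := o.getD "note" ""  -- office["note"]; KeyError excluded by Pre_
  if (d.getD note PySem.Dict.empty).size == 0 then d.insert note o else d

def pvBuildA (offs : List (List (String × String))) : PySem.Dict String (PySem.Dict String String) :=
  offs.foldl pvStepA PySem.Dict.empty

def pvLoopStepA (old_offices new_offices : PySem.Dict String (PySem.Dict String String))
    (acc : List (List (String × String)) × Bool) (note : String) :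
    List (List (String × String)) × Bool :=
  let oldO := old_offices.getD note PySem.Dict.empty
  let combined := pvUpdateOffice oldO (new_offices.getD note PySem.Dict.empty)
  (acc.1 ++ [combined.items], acc.2 || !(pvDictEq combined oldO))

def merge_contact_details (old : Option (List (List (String × String)))) (new : Option (List (List (String × String)))) : Option (List (List (String × String))) :=
  let old_offices := pvBuildA (old.getD [])
  let new_offices := pvBuildA (new.getD [])
  let notes := PySem.List.sorted
    (PySem.Set.union (PySem.Set.ofList old_offices.keys) new_offices.keys) (fun x => x) false
  let r := notes.foldl (pvLoopStepA old_offices new_offices) ([], false)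
  if r.2 then some r.1 else none

-- ===== PORT B =====
-- o["note"]; KeyError excluded by Pre_
def pvNote (d : PySem.Dict String String) : String := d.getD "note" ""

-- _sorted_unique: sorted(offices, key=lambda o: o["note"]); the zip scan over adjacent
-- pairs only ever raises NotImplementedError (duplicate note, excluded by Pre_), so within
-- Pre_ it returns `result` unchanged.
def pvSortedUnique (offs : List (List (String × String))) : List (PySem.Dict String String) :=
  PySem.List.sorted (offs.map PySem.Dict.ofList) pvNote false

-- {**a, **b}
def pvMergeDict (a b : PySem.Dict String String) : PySem.Dict String String :=
  b.items.foldl (fun d kv => d.insert kv.1 kv.2) a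

-- the two-pointer while loop of B, one recursive step per iteration
def pvMergeLoop (olds news : List (PySem.Dict String String))
    (acc : List (List (String × String))) (changed : Bool) :
    List (List (String × String)) × Bool :=
  match olds, news with
  | [], [] => (acc, changed)
  | o :: os, [] => pvMergeLoop os [] (acc ++ [o.items]) changed
  | [], n :: ns => pvMergeLoop [] ns (acc ++ [n.items]) true
  | o :: os, n :: ns =>
      if pvNote o < pvNote n then pvMergeLoop os (n :: ns) (acc ++ [o.items]) changed
      else if pvNote n < pvNote o then pvMergeLoop (o :: os) ns (acc ++ [n.items]) true
      else
        let c := pvMergeDict o n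
        pvMergeLoop os ns (acc ++ [c.items]) (changed || !(pvDictEq c o))
termination_by olds.length + news.length

def merge_contact_details_alt (old : Option (List (List (String × String)))) (new : Option (List (List (String × String)))) : Option (List (List (String × String))) :=
  let olds := pvSortedUnique (old.getD [])
  let news := pvSortedUnique (new.getD [])
  let r := pvMergeLoop olds news [] false
  if r.2 then some r.1 else none

-- ===== PRECONDITION & SPEC =====
-- Pre_ is exactly where the Python A returns: every office has a "note" key (else KeyError)
-- and no note repeats within old or within new (else NotImplementedError); B raises there too.
def pvNoteL (o : List (String × String)) : String := (PySem.Dict.ofList o).getD "note" ""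

def pvOffsOK (offs : List (List (String × String))) : Prop :=
  (∀ o ∈ offs, (PySem.Dict.ofList o).contains "note" = true) ∧
  (offs.map pvNoteL).Nodup

def Pre_merge_contact_details (old : Option (List (List (String × String)))) (new : Option (List (List (String × String)))) : Prop :=
  pvOffsOK (old.getD []) ∧ pvOffsOK (new.getD [])
instance (old : Option (List (List (String × String)))) (new : Option (List (List (String × String)))) : Decidable (Pre_merge_contact_details old new) := by
  unfold Pre_merge_contact_details pvOffsOK; infer_instance

def pvWitness_merge_contact_details : (Option (List (List (String × String)))) × (Option (List (List (String × String)))) :=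
  (some [[("note", "Capitol Office"), ("voice", "555-0100")]],
   some [[("note", "Capitol Office"), ("voice", "555-0199")]])

def Spec_merge_contact_details (old : Option (List (List (String × String)))) (new : Option (List (List (String × String)))) (out : Option (List (List (String × String)))) : Prop := out = merge_contact_details_alt old new
instance (old : Option (List (List (String × String)))) (new : Option (List (List (String × String)))) (out : Option (List (List (String × String)))) : Decidable (Spec_merge_contact_details old new out) := by unfold Spec_merge_contact_details; infer_instance

-- ===== CLAIM (what is proved, stated in full; the proofs are below) =====
def Claim_equal_merge_contact_details : Prop := ∀ (old : Option (List (List (String × String)))) (new : Option (List (List (String × String)))), Dom_merge_contact_details old new → Pre_merge_contact_details old new → Spec_merge_contact_details old new (merge_contact_details old new)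

-- ===== LEMMAS AND PROOFS =====

-- merge of the two strictly increasing note lists = B's traversal order of notes
def pvUnionMerge (ks ls : List String) : List String :=
  match ks, ls with
  | [], ls => ls
  | ks, [] => ks
  | k :: ks, l :: ls =>
      if k < l then k :: pvUnionMerge ks (l :: ls)
      else if l < k then l :: pvUnionMerge (k :: ks) ls
      else k :: pvUnionMerge ks ls
termination_by ks.length + ls.length

theorem mem_pvUnionMerge (ks ls : List String) (x : String) :
    x ∈ pvUnionMerge ks ls ↔ x ∈ ks ∨ x ∈ ls := by
  induction ks, ls using pvUnionMerge.induct with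
  | case1 ls => simp [pvUnionMerge]
  | case2 k ks => simp [pvUnionMerge]
  | case3 k ks l ls h ih => simp only [pvUnionMerge, if_pos h, List.mem_cons, ih]; tauto
  | case4 k ks l ls h1 h2 ih => simp only [pvUnionMerge, if_neg h1, if_pos h2, List.mem_cons, ih]; tauto
  | case5 k ks l ls h1 h2 ih =>
      have hkl : k = l := le_antisymm (not_lt.1 h2) (not_lt.1 h1)
      subst hkl
      simp only [pvUnionMerge, if_neg h1, List.mem_cons, ih]; tauto

theorem pairwise_pvUnionMerge (ks ls : List String)
    (hk : ks.Pairwise (· < ·)) (hl : ls.Pairwise (· < ·)) :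
    (pvUnionMerge ks ls).Pairwise (· < ·) := by
  induction ks, ls using pvUnionMerge.induct with
  | case1 ls => simpa [pvUnionMerge] using hl
  | case2 k ks => simpa [pvUnionMerge] using hk
  | case3 k ks l ls h ih =>
      rw [List.pairwise_cons] at hk
      simp only [pvUnionMerge, if_pos h]
      refine List.pairwise_cons.2 ⟨?_, ih hk.2 hl⟩
      intro y hy
      rcases (mem_pvUnionMerge ks (l :: ls) y).1 hy with hy | hy
      · exact hk.1 y hy
      · rcases List.mem_cons.1 hy with rfl | hy
        · exact h
        · exact lt_trans h ((List.pairwise_cons.1 hl).1 y hy)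
  | case4 k ks l ls h1 h2 ih =>
      rw [List.pairwise_cons] at hl
      simp only [pvUnionMerge, if_neg h1, if_pos h2]
      refine List.pairwise_cons.2 ⟨?_, ih hk hl.2⟩
      intro y hy
      rcases (mem_pvUnionMerge (k :: ks) ls y).1 hy with hy | hy
      · rcases List.mem_cons.1 hy with rfl | hy
        · exact h2
        · exact lt_trans h2 ((List.pairwise_cons.1 hk).1 y hy)
      · exact hl.1 y hy
  | case5 k ks l ls h1 h2 ih =>
      have hkl : k = l := le_antisymm (not_lt.1 h2) (not_lt.1 h1)
      subst hkl
      rw [List.pairwise_cons] at hk hl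
      simp only [pvUnionMerge, if_neg h1]
      refine List.pairwise_cons.2 ⟨?_, ih hk.2 hl.2⟩
      intro y hy
      rcases (mem_pvUnionMerge ks ls y).1 hy with hy | hy
      · exact hk.1 y hy
      · exact hl.1 y hy

-- A's for/else field scan always ends by writing newval under newfield.
theorem pvUpdateField_eq (upd : PySem.Dict String String) (olds : List (String × String))
    (nf nv : String) : pvUpdateField upd olds nf nv = upd.insert nf nv := by
  induction olds with
  | nil => rfl
  | cons p rest ih =>
      obtain ⟨of, ov⟩ := p
      simp only [pvUpdateField]
      split
      · next h =>
          rw [Bool.and_eq_true, beq_iff_eq] at h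
          rw [h.1]
      · exact ih

-- hence update_office is exactly the dict merge {**old, **new}.
theorem pvUpdateOffice_eq_merge (a b : PySem.Dict String String) :
    pvUpdateOffice a b = pvMergeDict a b := by
  simp [pvUpdateOffice, pvMergeDict, pvUpdateField_eq]

-- shape of A's third loop: append-and-or fold = map + any.
theorem pvLoopA_eq (I J : PySem.Dict String (PySem.Dict String String))
    (ns : List String) (acc : List (List (String × String))) (upd : Bool) :
    ns.foldl (pvLoopStepA I J) (acc, upd) =
      (acc ++ ns.map (fun n =>
          (pvUpdateOffice (I.getD n PySem.Dict.empty) (J.getD n PySem.Dict.empty)).items),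
       upd || ns.any (fun n =>
          !(pvDictEq (pvUpdateOffice (I.getD n PySem.Dict.empty) (J.getD n PySem.Dict.empty))
              (I.getD n PySem.Dict.empty)))) := by
  induction ns generalizing acc upd with
  | nil => simp
  | cons n rest ih =>
      simp only [List.foldl_cons, List.map_cons, List.any_cons, ih, pvLoopStepA]
      simp [Bool.or_assoc]

-- a dict containing "note" is nonempty
theorem pvSize_ne_zero (d : PySem.Dict String String) (h : d.contains "note" = true) :
    d.size ≠ 0 := by
  have hm : "note" ∈ d.keys := (PySem.Dict.contains_iff_mem_keys d "note").1 h
  simp only [PySem.Dict.keys] at hm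
  simp only [PySem.Dict.size]
  intro h0
  rw [List.length_eq_zero_iff] at h0
  simp [h0] at hm

-- A's index-building loop under Pre_: the defaultdict guard always inserts, over fresh keys.
theorem pvBuildA_items (offs : List (List (String × String)))
    (hc : ∀ o ∈ offs, (PySem.Dict.ofList o).contains "note" = true)
    (hn : (offs.map pvNoteL).Nodup) :
    (pvBuildA offs).items = offs.map (fun o => (pvNoteL o, PySem.Dict.ofList o)) := by
  have key : ∀ (offs : List (List (String × String)))
      (d : PySem.Dict String (PySem.Dict String String)),
      (∀ o ∈ offs, (PySem.Dict.ofList o).contains "note" = true) →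
      (offs.map pvNoteL).Nodup →
      (∀ o ∈ offs, d.contains (pvNoteL o) = false) →
      (∀ k v, d.get? k = some v → v.size ≠ 0) →
      (offs.foldl pvStepA d).items = d.items ++ offs.map (fun o => (pvNoteL o, PySem.Dict.ofList o)) := by
    intro offs
    induction offs with
    | nil => intro d _ _ _ _; simp
    | cons o rest ih =>
        intro d hc hn hf hv
        have hcon : d.contains (pvNoteL o) = false := hf o (List.mem_cons_self ..)
        have hgetD : d.getD (pvNoteL o) PySem.Dict.empty = PySem.Dict.empty :=
          PySem.Dict.getD_of_not_contains d _ hcon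
        have hstep : pvStepA d o = d.insert (pvNoteL o) (PySem.Dict.ofList o) := by
          simp only [pvStepA, pvNoteL] at hgetD ⊢
          rw [hgetD]; simp
        have hsz : (PySem.Dict.ofList o).size ≠ 0 :=
          pvSize_ne_zero _ (hc o (List.mem_cons_self ..))
        have hn' : pvNoteL o ∉ rest.map pvNoteL ∧ (rest.map pvNoteL).Nodup := by
          rw [List.map_cons, List.nodup_cons] at hn; exact hn
        simp only [List.foldl_cons, hstep]
        rw [ih _ (fun x hx => hc x (List.mem_cons_of_mem _ hx))
              hn'.2 ?fresh ?vals]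
        · rw [PySem.Dict.items_insert_of_not_contains d _ hcon]
          simp
        case fresh =>
          intro x hx
          have hne : pvNoteL x ≠ pvNoteL o := by
            intro he
            exact hn'.1 (he ▸ (List.mem_map_of_mem hx))
          rw [PySem.Dict.contains_insert]
          simp only [Bool.or_eq_false_iff]
          exact ⟨by simpa using hne, hf x (List.mem_cons_of_mem _ hx)⟩
        case vals =>
          intro k v hkv
          rw [PySem.Dict.get?_insert] at hkv
          split at hkv
          · cases hkv; exact hsz
          · exact hv k v hkv
  have := key offs PySem.Dict.empty hc hn (by simp [PySem.Dict.contains_empty])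
    (by intro k v hkv; simp [PySem.Dict.get?_empty] at hkv)
  simpa [pvBuildA] using this

-- Python d == d
theorem pvDictEq_refl (d : PySem.Dict String String) (h : d.keys.Nodup) :
    pvDictEq d d = true := by
  simp only [pvDictEq, beq_self_eq_true, Bool.true_and, List.all_eq_true]
  intro kv hkv
  rw [PySem.Dict.get?_of_mem_items d (by exact hkv) h]
  simp

theorem pvDictEq_empty_right (d : PySem.Dict String String) (h : d.contains "note" = true) :
    pvDictEq d PySem.Dict.empty = false := by
  have := pvSize_ne_zero d h
  simp only [pvDictEq, PySem.Dict.size_empty, Bool.and_eq_false_iff]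
  left
  simpa using this

theorem pvMergeDict_empty_right (d : PySem.Dict String String) :
    pvMergeDict d PySem.Dict.empty = d := rfl

theorem pvMergeDict_empty_left (d : PySem.Dict String String) (h : d.keys.Nodup) :
    pvMergeDict PySem.Dict.empty d = d := by
  apply PySem.Dict.ext
  have := PySem.Dict.items_foldl_insert_fresh d.items (fun kv => kv.1) (fun kv => kv.2)
    PySem.Dict.empty (by intro a _; exact PySem.Dict.contains_empty a.1) (by exact h)
  simpa [pvMergeDict, PySem.Dict.items] using this

-- the heart: B's two-pointer merge computes exactly A's per-note map/any over the
-- sorted union of notes, given that I/J look up the offices of xs/ys by note.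
theorem pvMergeLoop_spec (I J : PySem.Dict String (PySem.Dict String String))
    (olds news : List (PySem.Dict String String))
    (acc : List (List (String × String))) (changed : Bool)
    (hx : (olds.map pvNote).Pairwise (· < ·))
    (hy : (news.map pvNote).Pairwise (· < ·))
    (hIx : ∀ d ∈ olds, I.getD (pvNote d) PySem.Dict.empty = d)
    (hJy : ∀ d ∈ news, J.getD (pvNote d) PySem.Dict.empty = d)
    (hI0 : ∀ n ∈ news.map pvNote, n ∉ olds.map pvNote → I.getD n PySem.Dict.empty = PySem.Dict.empty)
    (hJ0 : ∀ n ∈ olds.map pvNote, n ∉ news.map pvNote → J.getD n PySem.Dict.empty = PySem.Dict.empty)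
    (hxk : ∀ d ∈ olds, d.keys.Nodup)
    (hyk : ∀ d ∈ news, d.keys.Nodup ∧ d.contains "note" = true) :
    pvMergeLoop olds news acc changed =
      (acc ++ (pvUnionMerge (olds.map pvNote) (news.map pvNote)).map (fun n =>
          (pvMergeDict (I.getD n PySem.Dict.empty) (J.getD n PySem.Dict.empty)).items),
       changed || (pvUnionMerge (olds.map pvNote) (news.map pvNote)).any (fun n =>
          !(pvDictEq (pvMergeDict (I.getD n PySem.Dict.empty) (J.getD n PySem.Dict.empty))
              (I.getD n PySem.Dict.empty)))) := by
  revert hx hy hIx hJy hI0 hJ0 hxk hyk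
  induction olds, news, acc, changed using pvMergeLoop.induct with
  | case1 acc changed =>
      intro _ _ _ _ _ _ _ _
      simp [pvMergeLoop, pvUnionMerge]
  | case2 acc changed o os ih =>
      intro hx hy hIx hJy hI0 hJ0 hxk hyk
      have hIo : I.getD (pvNote o) PySem.Dict.empty = o := hIx o (List.mem_cons_self ..)
      have hJo : J.getD (pvNote o) PySem.Dict.empty = PySem.Dict.empty :=
        hJ0 (pvNote o) (by rw [List.map_cons]; exact List.mem_cons_self ..) (by simp)
      rw [List.map_cons, List.pairwise_cons] at hx
      rw [pvMergeLoop, ih hx.2 hy (fun d hd => hIx d (List.mem_cons_of_mem _ hd))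
            hJy (by simp)
            (fun m hm h0 => hJ0 m ((by rw [List.map_cons]; exact List.mem_cons_of_mem _ hm)) h0)
            (fun d hd => hxk d (List.mem_cons_of_mem _ hd)) hyk]
      have hu : pvUnionMerge (List.map pvNote (o :: os)) (List.map pvNote []) =
          pvNote o :: List.map pvNote os := by
        cases os <;> simp [pvUnionMerge]
      have hu2 : pvUnionMerge (List.map pvNote os) (List.map pvNote []) =
          List.map pvNote os := by
        cases os <;> simp [pvUnionMerge]
      rw [hu, hu2]
      simp [hIo, hJo, pvMergeDict_empty_right, pvDictEq_refl o (hxk o (List.mem_cons_self ..))]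
  | case3 acc changed n ns ih =>
      intro hx hy hIx hJy hI0 hJ0 hxk hyk
      have hJn : J.getD (pvNote n) PySem.Dict.empty = n := hJy n (List.mem_cons_self ..)
      have hIn : I.getD (pvNote n) PySem.Dict.empty = PySem.Dict.empty :=
        hI0 (pvNote n) (by rw [List.map_cons]; exact List.mem_cons_self ..) (by simp)
      rw [List.map_cons, List.pairwise_cons] at hy
      rw [pvMergeLoop, ih hx hy.2 hIx (fun d hd => hJy d (List.mem_cons_of_mem _ hd))
            (fun m hm h0 => hI0 m ((by rw [List.map_cons]; exact List.mem_cons_of_mem _ hm)) h0)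
            (by simp) hxk (fun d hd => hyk d (List.mem_cons_of_mem _ hd))]
      simp [pvUnionMerge, hIn, hJn,
        pvMergeDict_empty_left n (hyk n (List.mem_cons_self ..)).1,
        pvDictEq_empty_right n (hyk n (List.mem_cons_self ..)).2]
  | case4 acc changed o os n ns hlt ih =>
      intro hx hy hIx hJy hI0 hJ0 hxk hyk
      have hIo : I.getD (pvNote o) PySem.Dict.empty = o := hIx o (List.mem_cons_self ..)
      rw [List.map_cons, List.pairwise_cons] at hx
      have hybig : ∀ m ∈ List.map pvNote (n :: ns), pvNote o < m := by
        rw [List.map_cons, List.pairwise_cons] at hy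
        intro m hm
        rcases List.mem_cons.1 hm with rfl | hm
        · exact hlt
        · rcases List.mem_map.1 hm with ⟨d, hd, rfl⟩
          exact lt_trans hlt (hy.1 _ (List.mem_map_of_mem hd))
      have hJo : J.getD (pvNote o) PySem.Dict.empty = PySem.Dict.empty :=
        hJ0 (pvNote o) (by rw [List.map_cons]; exact List.mem_cons_self ..)
          (fun hmem => absurd (hybig _ hmem) (lt_irrefl _))
      have hI0' : ∀ m ∈ List.map pvNote (n :: ns), m ∉ List.map pvNote os →
          I.getD m PySem.Dict.empty = PySem.Dict.empty := by
        intro m hm hnm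
        refine hI0 m hm ?_
        rw [List.map_cons, List.mem_cons]
        rintro (rfl | hc)
        · exact absurd (hybig _ hm) (lt_irrefl _)
        · exact hnm hc
      rw [pvMergeLoop, if_pos hlt,
          ih hx.2 hy (fun d hd => hIx d (List.mem_cons_of_mem _ hd)) hJy hI0'
            (fun m hm h0 => hJ0 m ((by rw [List.map_cons]; exact List.mem_cons_of_mem _ hm)) h0)
            (fun d hd => hxk d (List.mem_cons_of_mem _ hd)) hyk]
      have hu : pvUnionMerge (List.map pvNote (o :: os)) (List.map pvNote (n :: ns)) =
          pvNote o :: pvUnionMerge (List.map pvNote os) (List.map pvNote (n :: ns)) := by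
        simp [pvUnionMerge, hlt]
      rw [hu]
      simp [hIo, hJo, pvMergeDict_empty_right, pvDictEq_refl o (hxk o (List.mem_cons_self ..))]
  | case5 acc changed o os n ns hnlt hlt ih =>
      intro hx hy hIx hJy hI0 hJ0 hxk hyk
      have hJn : J.getD (pvNote n) PySem.Dict.empty = n := hJy n (List.mem_cons_self ..)
      rw [List.map_cons, List.pairwise_cons] at hy
      have hxbig : ∀ m ∈ List.map pvNote (o :: os), pvNote n < m := by
        rw [List.map_cons, List.pairwise_cons] at hx
        intro m hm
        rcases List.mem_cons.1 hm with rfl | hm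
        · exact hlt
        · rcases List.mem_map.1 hm with ⟨d, hd, rfl⟩
          exact lt_trans hlt (hx.1 _ (List.mem_map_of_mem hd))
      have hIn : I.getD (pvNote n) PySem.Dict.empty = PySem.Dict.empty :=
        hI0 (pvNote n) (by rw [List.map_cons]; exact List.mem_cons_self ..)
          (fun hmem => absurd (hxbig _ hmem) (lt_irrefl _))
      have hJ0' : ∀ m ∈ List.map pvNote (o :: os), m ∉ List.map pvNote ns →
          J.getD m PySem.Dict.empty = PySem.Dict.empty := by
        intro m hm hnm
        refine hJ0 m hm ?_
        rw [List.map_cons, List.mem_cons]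
        rintro (rfl | hc)
        · exact absurd (hxbig _ hm) (lt_irrefl _)
        · exact hnm hc
      rw [pvMergeLoop, if_neg hnlt, if_pos hlt,
          ih hx hy.2 hIx (fun d hd => hJy d (List.mem_cons_of_mem _ hd))
            (fun m hm h0 => hI0 m ((by rw [List.map_cons]; exact List.mem_cons_of_mem _ hm)) h0)
            hJ0' hxk (fun d hd => hyk d (List.mem_cons_of_mem _ hd))]
      have hu : pvUnionMerge (List.map pvNote (o :: os)) (List.map pvNote (n :: ns)) =
          pvNote n :: pvUnionMerge (List.map pvNote (o :: os)) (List.map pvNote ns) := by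
        simp [pvUnionMerge, hnlt, hlt]
      rw [hu]
      simp [hIn, hJn, pvMergeDict_empty_left n (hyk n (List.mem_cons_self ..)).1,
        pvDictEq_empty_right n (hyk n (List.mem_cons_self ..)).2]
  | case6 acc changed o os n ns hnlt hnlt2 c ih =>
      intro hx hy hIx hJy hI0 hJ0 hxk hyk
      have heq : pvNote o = pvNote n := le_antisymm (not_lt.1 hnlt2) (not_lt.1 hnlt)
      have hIo : I.getD (pvNote o) PySem.Dict.empty = o := hIx o (List.mem_cons_self ..)
      have hJn : J.getD (pvNote o) PySem.Dict.empty = n := heq ▸ hJy n (List.mem_cons_self ..)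
      rw [List.map_cons, List.pairwise_cons] at hx hy
      have hI0' : ∀ m ∈ List.map pvNote ns, m ∉ List.map pvNote os →
          I.getD m PySem.Dict.empty = PySem.Dict.empty := by
        intro m hm hnm
        refine hI0 m ((by rw [List.map_cons]; exact List.mem_cons_of_mem _ hm)) ?_
        rw [List.map_cons, List.mem_cons]
        rintro (rfl | hc)
        · have := hy.1 _ hm
          rw [heq] at this
          exact lt_irrefl _ this
        · exact hnm hc
      have hJ0' : ∀ m ∈ List.map pvNote os, m ∉ List.map pvNote ns →
          J.getD m PySem.Dict.empty = PySem.Dict.empty := by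
        intro m hm hnm
        refine hJ0 m ((by rw [List.map_cons]; exact List.mem_cons_of_mem _ hm)) ?_
        rw [List.map_cons, List.mem_cons]
        rintro (rfl | hc)
        · have := hx.1 _ hm
          rw [← heq] at this
          exact lt_irrefl _ this
        · exact hnm hc
      rw [pvMergeLoop, if_neg hnlt, if_neg hnlt2]
      rw [ih hx.2 hy.2 (fun d hd => hIx d (List.mem_cons_of_mem _ hd))
            (fun d hd => hJy d (List.mem_cons_of_mem _ hd)) hI0' hJ0'
            (fun d hd => hxk d (List.mem_cons_of_mem _ hd))
            (fun d hd => hyk d (List.mem_cons_of_mem _ hd))]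
      have hu : pvUnionMerge (List.map pvNote (o :: os)) (List.map pvNote (n :: ns)) =
          pvNote o :: pvUnionMerge (List.map pvNote os) (List.map pvNote ns) := by
        simp [pvUnionMerge, hnlt, hnlt2]
      rw [hu]
      simp [hIo, hJn, Bool.or_assoc]
      exact ⟨rfl, rfl⟩

-- everything the main proof needs about one side: its sorted list vs its index dict
theorem pvSide (offs : List (List (String × String)))
    (hc : ∀ o ∈ offs, (PySem.Dict.ofList o).contains "note" = true)
    (hn : (offs.map pvNoteL).Nodup) :
    ((PySem.List.sorted (offs.map PySem.Dict.ofList) pvNote false).map pvNote).Pairwise (· < ·)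
    ∧ (∀ d ∈ PySem.List.sorted (offs.map PySem.Dict.ofList) pvNote false,
        (pvBuildA offs).getD (pvNote d) PySem.Dict.empty = d)
    ∧ (∀ n, n ∉ (PySem.List.sorted (offs.map PySem.Dict.ofList) pvNote false).map pvNote →
        (pvBuildA offs).getD n PySem.Dict.empty = PySem.Dict.empty)
    ∧ (∀ d ∈ PySem.List.sorted (offs.map PySem.Dict.ofList) pvNote false,
        d.keys.Nodup ∧ d.contains "note" = true)
    ∧ (∀ x, x ∈ (PySem.List.sorted (offs.map PySem.Dict.ofList) pvNote false).map pvNote ↔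
        x ∈ (pvBuildA offs).keys) := by
  have hitems := pvBuildA_items offs hc hn
  have hkeys : (pvBuildA offs).keys = offs.map pvNoteL := by
    simp [PySem.Dict.keys, hitems, List.map_map, Function.comp]
  have hknd : (pvBuildA offs).keys.Nodup := by rw [hkeys]; exact hn
  have hperm : (PySem.List.sorted (offs.map PySem.Dict.ofList) pvNote false).Perm
      (offs.map PySem.Dict.ofList) := PySem.List.sorted_perm ..
  have hmapeq : (offs.map PySem.Dict.ofList).map pvNote = offs.map pvNoteL := by
    simp [List.map_map]
    exact fun a _ => rfl
  have hmperm : ((PySem.List.sorted (offs.map PySem.Dict.ofList) pvNote false).map pvNote).Perm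
      (offs.map pvNoteL) := hmapeq ▸ hperm.map pvNote
  have hmem : ∀ x, x ∈ (PySem.List.sorted (offs.map PySem.Dict.ofList) pvNote false).map pvNote ↔
      x ∈ offs.map pvNoteL := fun x => hmperm.mem_iff
  refine ⟨?_, ?_, ?_, ?_, ?_⟩
  · have hle := PySem.List.sorted_pairwise (offs.map PySem.Dict.ofList) pvNote
    have hnd : ((PySem.List.sorted (offs.map PySem.Dict.ofList) pvNote false).map pvNote).Pairwise (· ≠ ·) :=
      hmperm.nodup_iff.2 hn
    rw [List.pairwise_map] at hnd
    rw [List.pairwise_map]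
    exact (hle.and hnd).imp (fun h => lt_of_le_of_ne h.1 h.2)
  · intro d hd
    have hd' : d ∈ offs.map PySem.Dict.ofList := hperm.mem_iff.1 hd
    rcases List.mem_map.1 hd' with ⟨o, ho, rfl⟩
    exact PySem.Dict.getD_of_mem_items _
      (hitems ▸ List.mem_map_of_mem (f := fun o => (pvNoteL o, PySem.Dict.ofList o)) ho) hknd _
  · intro n hnmem
    refine PySem.Dict.getD_of_not_contains _ _ ?_
    have : n ∉ (pvBuildA offs).keys := by
      rw [hkeys]
      exact fun hmemk => hnmem ((hmem n).2 hmemk)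
    rcases hcontains : (pvBuildA offs).contains n with _ | _
    · rfl
    · exact absurd ((PySem.Dict.contains_iff_mem_keys ..).1 hcontains) this
  · intro d hd
    have hd' : d ∈ offs.map PySem.Dict.ofList := hperm.mem_iff.1 hd
    rcases List.mem_map.1 hd' with ⟨o, ho, rfl⟩
    exact ⟨PySem.Dict.nodup_keys_ofList o, hc o ho⟩
  · intro x
    rw [hmem x, hkeys]

-- ===== VERDICT (by name: the statement is the Claim_ definition above) =====
theorem merge_contact_details_spec : Claim_equal_merge_contact_details := by
  intro old new _dom pre
  obtain ⟨⟨hoc, hon⟩, ⟨hnc, hnn⟩⟩ := pre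
  obtain ⟨hxp, hIx, hI0, hxkk, hxmem⟩ := pvSide (old.getD []) hoc hon
  obtain ⟨hyp, hJy, hJ0, hykk, hymem⟩ := pvSide (new.getD []) hnc hnn
  have hns : PySem.List.sorted
      (PySem.Set.union (PySem.Set.ofList (pvBuildA (old.getD [])).keys)
        (pvBuildA (new.getD [])).keys) (fun x => x) false =
      pvUnionMerge
        ((PySem.List.sorted ((old.getD []).map PySem.Dict.ofList) pvNote false).map pvNote)
        ((PySem.List.sorted ((new.getD []).map PySem.Dict.ofList) pvNote false).map pvNote) := by
    apply PySem.List.sorted_eq_of_perm_of_pairwise_lt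
    · rw [List.perm_ext_iff_of_nodup]
      · intro a
        rw [mem_pvUnionMerge, PySem.Set.mem_union, PySem.Set.mem_ofList, hxmem, hymem]
      · exact (pairwise_pvUnionMerge _ _ hxp hyp).imp (fun h => ne_of_lt h)
      · exact PySem.Set.nodup_union _ _ (PySem.Set.nodup_ofList _)
    · exact pairwise_pvUnionMerge _ _ hxp hyp
  unfold Spec_merge_contact_details merge_contact_details merge_contact_details_alt pvSortedUnique
  dsimp only
  rw [pvLoopA_eq, hns,
      pvMergeLoop_spec (pvBuildA (old.getD [])) (pvBuildA (new.getD [])) _ _ [] false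
        hxp hyp hIx hJy (fun n _ h => hI0 n h) (fun n _ h => hJ0 n h)
        (fun d hd => (hxkk d hd).1) hykk]
  simp only [List.nil_append, pvUpdateOffice_eq_merge, Bool.false_or]
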